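-- pv_equiv track=rewrite | github.com/y-tsutsu/atcoder-template | algorithms/accumulator.py | accumulate3dim
-- ===== SOURCE A (Python) =====
-- from itertools import accumulate, product
--
-- def accumulate3dim(a):
--     d, h, w = len(a), len(a[0]), len(a[0][0])
--     p = [[[0 for _ in range(w + 1)] for _ in range(h + 1)] for _ in range(d + 1)]
--     for i, j, k in product(range(d), range(h), range(w)):
--         p[i + 1][j + 1][k + 1] = a[i][j][k]
--     for i, j, k in product(range(d + 1), range(h + 1), range(w)):
--         p[i][j][k + 1] += p[i][j][k]
--     for i, j, k in product(range(d + 1), range(h), range(w + 1)):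
--         p[i][j + 1][k] += p[i][j][k]
--     for i, j, k in product(range(d), range(h + 1), range(w + 1)):
--         p[i + 1][j][k] += p[i][j][k]
--     return p
-- ===== SOURCE B (Python) =====
-- def accumulate3dim(a):
--     d, h, w = len(a), len(a[0]), len(a[0][0])
--     p = [[[0] * (w + 1) for _ in range(h + 1)] for _ in range(d + 1)]
--     for i in range(d):
--         for j in range(h):
--             for k in range(w):
--                 p[i + 1][j + 1][k + 1] = (a[i][j][k]
--                                           + p[i][j + 1][k + 1] + p[i + 1][j][k + 1] + p[i + 1][j + 1][k]
--                                           - p[i][j][k + 1] - p[i][j + 1][k] - p[i + 1][j][k]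
--                                           + p[i][j][k])
--     return p
-- ===== Notes on version B (the rewrite author's own statement) =====
-- stated objective: alternative
-- what changed: Replaces A's four separate passes (placement plus three axis-wise in-place accumulations) by a single fused triple loop that fills each padded cell directly with the 3D inclusion-exclusion recurrence over already-computed prefix values.
import Mathlib
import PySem

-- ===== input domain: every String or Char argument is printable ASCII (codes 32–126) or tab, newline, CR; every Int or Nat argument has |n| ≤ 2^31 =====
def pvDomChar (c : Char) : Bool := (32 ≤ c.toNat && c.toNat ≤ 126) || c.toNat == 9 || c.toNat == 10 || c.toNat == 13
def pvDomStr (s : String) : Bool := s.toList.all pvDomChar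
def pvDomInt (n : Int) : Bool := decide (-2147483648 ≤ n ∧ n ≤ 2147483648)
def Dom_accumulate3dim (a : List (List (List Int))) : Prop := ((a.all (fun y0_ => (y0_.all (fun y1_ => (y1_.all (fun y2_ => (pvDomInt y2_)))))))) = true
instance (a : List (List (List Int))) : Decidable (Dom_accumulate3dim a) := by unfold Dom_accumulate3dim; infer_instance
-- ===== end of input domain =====

-- B replaces A's four passes by one fused inclusion–exclusion pass; same return value (alternative decomposition, no speed claim).

-- ===== PORT A =====
-- p[i][j][k] read (in-range reads only inside Pre_, default 0/[] otherwise)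
def pvGet3 (p : List (List (List Int))) (i j k : Nat) : Int :=
  ((p.getD i []).getD j []).getD k 0

-- p[i][j][k] = v (in-range writes only on the inputs the claims cover)
def pvSet3 (p : List (List (List Int))) (i j k : Nat) (v : Int) : List (List (List Int)) :=
  p.modify i (fun pl => pl.modify j (fun r => r.set k v))

def accumulate3dim (a : List (List (List Int))) : List (List (List Int)) :=
  let d := a.length
  let h := (a.getD 0 []).length
  let w := ((a.getD 0 []).getD 0 []).length
  let p0 := List.replicate (d+1) (List.replicate (h+1) (List.replicate (w+1) (0:Int)))
  let p1 := (List.range d).foldl (fun p i => (List.range h).foldl (fun p j => (List.range w).foldl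
      (fun p k => pvSet3 p (i+1) (j+1) (k+1) (((a.getD i []).getD j []).getD k 0)) p) p) p0
  let p2 := (List.range (d+1)).foldl (fun p i => (List.range (h+1)).foldl (fun p j => (List.range w).foldl
      (fun p k => pvSet3 p i j (k+1) (pvGet3 p i j (k+1) + pvGet3 p i j k)) p) p) p1
  let p3 := (List.range (d+1)).foldl (fun p i => (List.range h).foldl (fun p j => (List.range (w+1)).foldl
      (fun p k => pvSet3 p i (j+1) k (pvGet3 p i (j+1) k + pvGet3 p i j k)) p) p) p2
  let p4 := (List.range d).foldl (fun p i => (List.range (h+1)).foldl (fun p j => (List.range (w+1)).foldl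
      (fun p k => pvSet3 p (i+1) j k (pvGet3 p (i+1) j k + pvGet3 p i j k)) p) p) p3
  p4

-- ===== PORT B =====
def accumulate3dim_alt (a : List (List (List Int))) : List (List (List Int)) :=
  let d := a.length
  let h := (a.getD 0 []).length
  let w := ((a.getD 0 []).getD 0 []).length
  let p0 := List.replicate (d+1) (List.replicate (h+1) (List.replicate (w+1) (0:Int)))
  (List.range d).foldl (fun p i => (List.range h).foldl (fun p j => (List.range w).foldl
      (fun p k => pvSet3 p (i+1) (j+1) (k+1)
        (((a.getD i []).getD j []).getD k 0
          + pvGet3 p i (j+1) (k+1) + pvGet3 p (i+1) j (k+1) + pvGet3 p (i+1) (j+1) k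
          - pvGet3 p i j (k+1) - pvGet3 p i (j+1) k - pvGet3 p (i+1) j k
          + pvGet3 p i j k)) p) p) p0

-- ===== PRECONDITION & SPEC =====
-- Pre_ excludes exactly the inputs on which Python A raises IndexError: empty a, empty a[0],
-- a plane shorter than len(a[0]), or one of the first h rows of a plane shorter than len(a[0][0]).
def Pre_accumulate3dim (a : List (List (List Int))) : Prop :=
  a ≠ [] ∧ (a.getD 0 []) ≠ [] ∧
  ∀ pl ∈ a, (a.getD 0 []).length ≤ pl.length ∧
    ∀ r ∈ pl.take (a.getD 0 []).length, ((a.getD 0 []).getD 0 []).length ≤ r.length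
instance (a : List (List (List Int))) : Decidable (Pre_accumulate3dim a) := by
  unfold Pre_accumulate3dim; infer_instance

def pvWitness_accumulate3dim : List (List (List Int)) := [[[1, 2], [3, 4]], [[5, 6], [7, 8]]]

def Spec_accumulate3dim (a : List (List (List Int))) (out : List (List (List Int))) : Prop := out = accumulate3dim_alt a
instance (a : List (List (List Int))) (out : List (List (List Int))) : Decidable (Spec_accumulate3dim a out) := by unfold Spec_accumulate3dim; infer_instance

-- ===== CLAIM (what is proved, stated in full; the proofs are below) =====
def Claim_equal_accumulate3dim : Prop := ∀ (a : List (List (List Int))), Dom_accumulate3dim a → Pre_accumulate3dim a → Spec_accumulate3dim a (accumulate3dim a)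

-- ===== LEMMAS AND PROOFS =====

-- cell of the input array (0 outside)
def gA (a : List (List (List Int))) (i j k : Nat) : Int := ((a.getD i []).getD j []).getD k 0

-- the 3D prefix sum both programs compute
def S3 (a : List (List (List Int))) (x y z : Nat) : Int :=
  ∑ i ∈ Finset.range x, ∑ j ∈ Finset.range y, ∑ k ∈ Finset.range z, gA a i j k

-- the (d+1)×(h+1)×(w+1) array whose cell (x,y,z) is f x y z
def F3 (d h w : Nat) (f : Nat → Nat → Nat → Int) : List (List (List Int)) :=
  (List.range (d+1)).map (fun x => (List.range (h+1)).map (fun y => (List.range (w+1)).map (fun z => f x y z)))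

-- point update at the function level
def updF (f : Nat → Nat → Nat → Int) (i j k : Nat) (v : Int) : Nat → Nat → Nat → Int :=
  fun x y z => if x = i ∧ y = j ∧ z = k then v else f x y z

theorem getElem?_range' (n x : Nat) : (List.range n)[x]? = if x < n then some x else none := by
  split
  · exact List.getElem?_range ‹_›
  · rw [List.getElem?_eq_none]; simpa using Nat.le_of_not_lt ‹_›

theorem map_range_modify {α : Type} (n j : Nat) (f : Nat → α) (g : α → α) :
    ((List.range n).map f).modify j g = (List.range n).map (fun y => if y = j then g (f y) else f y) := by
  apply List.ext_getElem?
  intro m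
  rw [List.getElem?_modify, List.getElem?_map, List.getElem?_map, getElem?_range']
  by_cases hm : m = j
  · subst hm; by_cases hmn : m < n <;> simp [hmn]
  · have hm2 : ¬ j = m := fun h => hm h.symm
    by_cases hmn : m < n <;> simp [hm, hm2, hmn]

theorem map_range_set {α : Type} (n k : Nat) (f : Nat → α) (v : α) :
    ((List.range n).map f).set k v = (List.range n).map (fun z => if z = k then v else f z) := by
  apply List.ext_getElem?
  intro m
  rw [List.getElem?_set, List.getElem?_map, List.getElem?_map, getElem?_range']
  simp only [List.length_map, List.length_range]
  by_cases hm : m = k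
  · subst hm; by_cases hmn : m < n <;> simp [hmn]
  · have hm2 : ¬ k = m := fun h => hm h.symm
    by_cases hmn : m < n <;> simp [hm, hm2, hmn]

theorem F3_get {d h w : Nat} (f : Nat → Nat → Nat → Int) {x y z : Nat}
    (hx : x ≤ d) (hy : y ≤ h) (hz : z ≤ w) : pvGet3 (F3 d h w f) x y z = f x y z := by
  have hx' : x < d + 1 := by omega
  have hy' : y < h + 1 := by omega
  have hz' : z < w + 1 := by omega
  simp [pvGet3, F3, List.getD_eq_getElem?_getD, hx', hy', hz']

theorem F3_set {d h w : Nat} (f : Nat → Nat → Nat → Int) (i j k : Nat) (v : Int) :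
    pvSet3 (F3 d h w f) i j k v = F3 d h w (updF f i j k v) := by
  unfold pvSet3 F3 updF
  rw [map_range_modify]
  apply List.map_congr_left
  intro x _
  by_cases hx : x = i
  · rw [if_pos hx, map_range_modify]
    apply List.map_congr_left
    intro y _
    by_cases hy : y = j
    · rw [if_pos hy, map_range_set]
      apply List.map_congr_left
      intro z _
      by_cases hz : z = k
      · simp [hx, hy, hz]
      · simp [hx, hy, hz]
    · rw [if_neg hy]
      apply List.map_congr_left
      intro z _
      simp [hy]
  · rw [if_neg hx]
    apply List.map_congr_left
    intro y _
    apply List.map_congr_left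
    intro z _
    simp [hx]

theorem F3_zero (d h w : Nat) :
    List.replicate (d+1) (List.replicate (h+1) (List.replicate (w+1) (0:Int)))
      = F3 d h w (fun _ _ _ => 0) := by
  unfold F3
  simp [List.map_const']

theorem F3_congr {d h w : Nat} {f g : Nat → Nat → Nat → Int}
    (hfg : ∀ x y z, x ≤ d → y ≤ h → z ≤ w → f x y z = g x y z) : F3 d h w f = F3 d h w g := by
  unfold F3
  apply List.map_congr_left
  intro x hx
  apply List.map_congr_left
  intro y hy
  apply List.map_congr_left
  intro z hz
  exact hfg x y z (by simpa using Nat.lt_succ_iff.mp (List.mem_range.mp hx))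
    (Nat.lt_succ_iff.mp (List.mem_range.mp hy)) (Nat.lt_succ_iff.mp (List.mem_range.mp hz))

theorem foldl_F3 {ι : Type} {d h w : Nat} (L : List ι)
    (G : List (List (List Int)) → ι → List (List (List Int)))
    (Fn : (Nat → Nat → Nat → Int) → ι → (Nat → Nat → Nat → Int))
    (hGF : ∀ f t, t ∈ L → G (F3 d h w f) t = F3 d h w (Fn f t)) (f : Nat → Nat → Nat → Int) :
    L.foldl G (F3 d h w f) = F3 d h w (L.foldl Fn f) := by
  induction L generalizing f with
  | nil => rfl
  | cons t L ih =>
    simp only [List.foldl_cons]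
    rw [hGF f t (List.mem_cons_self)]
    exact ih (fun f t ht => hGF f t (List.mem_cons_of_mem _ ht)) _

-- one transport lemma serving all five triple loops: a nested fold of cell writes on F3-arrays
-- equals the nested fold of the corresponding point updates at the function level
theorem trip_F3 {d h w : Nat} (L1 L2 L3 : List Nat)
    (c1 c2 c3 : Nat → Nat → Nat → Nat)
    (Vp : List (List (List Int)) → Nat → Nat → Nat → Int)
    (V : (Nat → Nat → Nat → Int) → Nat → Nat → Nat → Int)
    (hV : ∀ f i j k, i ∈ L1 → j ∈ L2 → k ∈ L3 → Vp (F3 d h w f) i j k = V f i j k)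
    (f : Nat → Nat → Nat → Int) :
    L1.foldl (fun p i => L2.foldl (fun p j => L3.foldl
        (fun p k => pvSet3 p (c1 i j k) (c2 i j k) (c3 i j k) (Vp p i j k)) p) p) (F3 d h w f)
      = F3 d h w (L1.foldl (fun f i => L2.foldl (fun f j => L3.foldl
        (fun f k => updF f (c1 i j k) (c2 i j k) (c3 i j k) (V f i j k)) f) f) f) := by
  apply foldl_F3
  intro f i hi
  apply foldl_F3
  intro f j hj
  apply foldl_F3
  intro f k hk
  rw [hV f i j k hi hj hk, F3_set]

-- function-level passes of A
def fP1 (a : List (List (List Int))) (d h w : Nat) : Nat → Nat → Nat → Int :=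
  (List.range d).foldl (fun f i => (List.range h).foldl (fun f j => (List.range w).foldl
      (fun f k => updF f (i+1) (j+1) (k+1) (gA a i j k)) f) f) (fun _ _ _ => 0)
def fP2 (d h w : Nat) (f0 : Nat → Nat → Nat → Int) : Nat → Nat → Nat → Int :=
  (List.range (d+1)).foldl (fun f i => (List.range (h+1)).foldl (fun f j => (List.range w).foldl
      (fun f k => updF f i j (k+1) (f i j (k+1) + f i j k)) f) f) f0
def fP3 (d h w : Nat) (f0 : Nat → Nat → Nat → Int) : Nat → Nat → Nat → Int :=
  (List.range (d+1)).foldl (fun f i => (List.range h).foldl (fun f j => (List.range (w+1)).foldl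
      (fun f k => updF f i (j+1) k (f i (j+1) k + f i j k)) f) f) f0
def fP4 (d h w : Nat) (f0 : Nat → Nat → Nat → Int) : Nat → Nat → Nat → Int :=
  (List.range d).foldl (fun f i => (List.range (h+1)).foldl (fun f j => (List.range (w+1)).foldl
      (fun f k => updF f (i+1) j k (f (i+1) j k + f i j k)) f) f) f0
-- function-level single fused pass of B
def fPB (a : List (List (List Int))) (d h w : Nat) : Nat → Nat → Nat → Int :=
  (List.range d).foldl (fun f i => (List.range h).foldl (fun f j => (List.range w).foldl
      (fun f k => updF f (i+1) (j+1) (k+1)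
        (gA a i j k + f i (j+1) (k+1) + f (i+1) j (k+1) + f (i+1) (j+1) k
          - f i j (k+1) - f i (j+1) k - f (i+1) j k + f i j k)) f) f) (fun _ _ _ => 0)

theorem portA_F3 (a : List (List (List Int))) :
    accumulate3dim a
      = F3 a.length (a.getD 0 []).length ((a.getD 0 []).getD 0 []).length
          (fP4 a.length (a.getD 0 []).length ((a.getD 0 []).getD 0 []).length
            (fP3 a.length (a.getD 0 []).length ((a.getD 0 []).getD 0 []).length
              (fP2 a.length (a.getD 0 []).length ((a.getD 0 []).getD 0 []).length
                (fP1 a (a.length) ((a.getD 0 []).length) (((a.getD 0 []).getD 0 []).length))))) := by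
  simp only [accumulate3dim]
  rw [F3_zero]
  unfold fP1 fP2 fP3 fP4
  rw [trip_F3 (Vp := fun p i j k => ((a.getD i []).getD j []).getD k 0)
      (V := fun f i j k => gA a i j k)
      (hV := fun f i j k hi hj hk => rfl)]
  rw [trip_F3 (Vp := fun p i j k => pvGet3 p i j (k+1) + pvGet3 p i j k)
      (V := fun f i j k => f i j (k+1) + f i j k)
      (hV := ?_)]
  rw [trip_F3 (Vp := fun p i j k => pvGet3 p i (j+1) k + pvGet3 p i j k)
      (V := fun f i j k => f i (j+1) k + f i j k)
      (hV := ?_)]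
  rw [trip_F3 (Vp := fun p i j k => pvGet3 p (i+1) j k + pvGet3 p i j k)
      (V := fun f i j k => f (i+1) j k + f i j k)
      (hV := ?_)]
  · intro f i j k hi hj hk
    have h1 := List.mem_range.mp hi
    have h2 := List.mem_range.mp hj
    have h3 := List.mem_range.mp hk
    beta_reduce
    rw [F3_get f (by omega) (by omega) (by omega), F3_get f (by omega) (by omega) (by omega)]
  · intro f i j k hi hj hk
    have h1 := List.mem_range.mp hi
    have h2 := List.mem_range.mp hj
    have h3 := List.mem_range.mp hk
    beta_reduce
    rw [F3_get f (by omega) (by omega) (by omega), F3_get f (by omega) (by omega) (by omega)]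
  · intro f i j k hi hj hk
    have h1 := List.mem_range.mp hi
    have h2 := List.mem_range.mp hj
    have h3 := List.mem_range.mp hk
    beta_reduce
    rw [F3_get f (by omega) (by omega) (by omega), F3_get f (by omega) (by omega) (by omega)]

theorem portB_F3 (a : List (List (List Int))) :
    accumulate3dim_alt a
      = F3 a.length (a.getD 0 []).length ((a.getD 0 []).getD 0 []).length
          (fPB a (a.length) ((a.getD 0 []).length) (((a.getD 0 []).getD 0 []).length)) := by
  simp only [accumulate3dim_alt]
  rw [F3_zero]
  unfold fPB
  rw [trip_F3 (Vp := fun p i j k => ((a.getD i []).getD j []).getD k 0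
          + pvGet3 p i (j+1) (k+1) + pvGet3 p (i+1) j (k+1) + pvGet3 p (i+1) (j+1) k
          - pvGet3 p i j (k+1) - pvGet3 p i (j+1) k - pvGet3 p (i+1) j k
          + pvGet3 p i j k)
      (V := fun f i j k => gA a i j k + f i (j+1) (k+1) + f (i+1) j (k+1) + f (i+1) (j+1) k
          - f i j (k+1) - f i (j+1) k - f (i+1) j k + f i j k)
      (hV := ?_)]
  intro f i j k hi hj hk
  have h1 := List.mem_range.mp hi
  have h2 := List.mem_range.mp hj
  have h3 := List.mem_range.mp hk
  beta_reduce
  rw [F3_get f (by omega) (by omega) (by omega), F3_get f (by omega) (by omega) (by omega),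
    F3_get f (by omega) (by omega) (by omega), F3_get f (by omega) (by omega) (by omega),
    F3_get f (by omega) (by omega) (by omega), F3_get f (by omega) (by omega) (by omega),
    F3_get f (by omega) (by omega) (by omega)]
  rfl

-- arithmetic facts about the 3D prefix sum
theorem sum_range_shift (n : Nat) (g : Nat → Int) :
    ∑ t ∈ Finset.range (n+1), (if 1 ≤ t then g (t-1) else 0) = ∑ t ∈ Finset.range n, g t := by
  rw [Finset.sum_range_succ']
  simp

theorem S3_rec (a : List (List (List Int))) (i j k : Nat) :
    S3 a (i+1) (j+1) (k+1)
      = gA a i j k + S3 a i (j+1) (k+1) + S3 a (i+1) j (k+1) + S3 a (i+1) (j+1) k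
        - S3 a i j (k+1) - S3 a i (j+1) k - S3 a (i+1) j k + S3 a i j k := by
  simp only [S3, Finset.sum_range_succ]
  ring

-- ==== characterization of A's four passes ====

-- pass 1, innermost loop
theorem fP1_inner (a : List (List (List Int))) (f : Nat → Nat → Nat → Int) (i j m : Nat) :
    ∀ x y z, ((List.range m).foldl (fun f k => updF f (i+1) (j+1) (k+1) (gA a i j k)) f) x y z
      = if x = i+1 ∧ y = j+1 ∧ 1 ≤ z ∧ z ≤ m then gA a i j (z-1) else f x y z := by
  induction m with
  | zero =>
    intro x y z
    simp only [List.range_zero, List.foldl_nil]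
    split_ifs with h
    · omega
    · rfl
  | succ m ih =>
    intro x y z
    rw [show List.range (m+1) = List.range m ++ [m] from List.range_succ]
    rw [List.foldl_append, List.foldl_cons, List.foldl_nil]
    simp only [updF]
    by_cases hc : x = i+1 ∧ y = j+1 ∧ z = m+1
    · obtain ⟨h1, h2, h3⟩ := hc
      subst h1; subst h2; subst h3
      simp
    · rw [if_neg hc, ih x y z]
      split_ifs <;> try rfl
      all_goals omega

theorem fP1_mid (a : List (List (List Int))) (w : Nat) (f : Nat → Nat → Nat → Int) (i n : Nat) :
    ∀ x y z, ((List.range n).foldl (fun f j => (List.range w).foldl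
        (fun f k => updF f (i+1) (j+1) (k+1) (gA a i j k)) f) f) x y z
      = if x = i+1 ∧ 1 ≤ y ∧ y ≤ n ∧ 1 ≤ z ∧ z ≤ w then gA a i (y-1) (z-1) else f x y z := by
  induction n with
  | zero =>
    intro x y z
    simp only [List.range_zero, List.foldl_nil]
    split_ifs with h
    · omega
    · rfl
  | succ n ih =>
    intro x y z
    rw [show List.range (n+1) = List.range n ++ [n] from List.range_succ]
    rw [List.foldl_append, List.foldl_cons, List.foldl_nil]
    rw [fP1_inner]
    by_cases hc : x = i+1 ∧ y = n+1 ∧ 1 ≤ z ∧ z ≤ w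
    · obtain ⟨h1, h2, h3, h4⟩ := hc
      subst h1; subst h2
      rw [if_pos ⟨rfl, rfl, h3, h4⟩, if_pos (by omega)]
      simp
    · rw [if_neg hc, ih x y z]
      split_ifs <;> try rfl
      all_goals omega

theorem fP1_char (a : List (List (List Int))) (h w : Nat) (f : Nat → Nat → Nat → Int) (nD : Nat) :
    ∀ x y z, ((List.range nD).foldl (fun f i => (List.range h).foldl (fun f j => (List.range w).foldl
        (fun f k => updF f (i+1) (j+1) (k+1) (gA a i j k)) f) f) f) x y z
      = if 1 ≤ x ∧ x ≤ nD ∧ 1 ≤ y ∧ y ≤ h ∧ 1 ≤ z ∧ z ≤ w then gA a (x-1) (y-1) (z-1) else f x y z := by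
  induction nD with
  | zero =>
    intro x y z
    simp only [List.range_zero, List.foldl_nil]
    split_ifs with h
    · omega
    · rfl
  | succ n ih =>
    intro x y z
    rw [show List.range (n+1) = List.range n ++ [n] from List.range_succ]
    rw [List.foldl_append, List.foldl_cons, List.foldl_nil]
    rw [fP1_mid]
    by_cases hc : x = n+1 ∧ 1 ≤ y ∧ y ≤ h ∧ 1 ≤ z ∧ z ≤ w
    · obtain ⟨h1, h2, h3, h4, h5⟩ := hc
      subst h1
      rw [if_pos ⟨rfl, h2, h3, h4, h5⟩, if_pos (by omega)]
      simp
    · rw [if_neg hc, ih x y z]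
      split_ifs <;> try rfl
      all_goals omega

-- pass 2 (scan along the last axis)
theorem fP2_inner (f : Nat → Nat → Nat → Int) (i j m : Nat) :
    ∀ x y z, ((List.range m).foldl (fun f k => updF f i j (k+1) (f i j (k+1) + f i j k)) f) x y z
      = if x = i ∧ y = j ∧ z ≤ m then ∑ t ∈ Finset.range (z+1), f x y t else f x y z := by
  induction m with
  | zero =>
    intro x y z
    simp only [List.range_zero, List.foldl_nil]
    split_ifs with h
    · obtain ⟨h1, h2, h3⟩ := h
      have hz : z = 0 := by omega
      subst hz
      rw [Finset.sum_range_one]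
    · rfl
  | succ m ih =>
    intro x y z
    rw [show List.range (m+1) = List.range m ++ [m] from List.range_succ]
    rw [List.foldl_append, List.foldl_cons, List.foldl_nil]
    simp only [updF]
    by_cases hc : x = i ∧ y = j ∧ z = m+1
    · obtain ⟨h1, h2, h3⟩ := hc
      subst h1; subst h2; subst h3
      rw [if_pos ⟨rfl, rfl, rfl⟩, ih, ih, if_neg (by omega), if_pos (by omega),
        if_pos (by omega)]
      rw [show (m+1+1 : Nat) = (m+1)+1 from rfl, Finset.sum_range_succ, Finset.sum_range_succ]
      rw [Finset.sum_range_succ]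
      ring
    · rw [if_neg hc, ih x y z]
      split_ifs <;> try rfl
      all_goals omega

theorem fP2_mid (w : Nat) (f : Nat → Nat → Nat → Int) (i n : Nat) :
    ∀ x y z, ((List.range n).foldl (fun f j => (List.range w).foldl
        (fun f k => updF f i j (k+1) (f i j (k+1) + f i j k)) f) f) x y z
      = if x = i ∧ y < n ∧ z ≤ w then ∑ t ∈ Finset.range (z+1), f x y t else f x y z := by
  induction n with
  | zero =>
    intro x y z
    simp only [List.range_zero, List.foldl_nil]
    split_ifs with h
    · omega
    · rfl
  | succ n ih =>
    intro x y z
    rw [show List.range (n+1) = List.range n ++ [n] from List.range_succ]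
    rw [List.foldl_append, List.foldl_cons, List.foldl_nil]
    rw [fP2_inner]
    by_cases hc : x = i ∧ y = n ∧ z ≤ w
    · obtain ⟨h1, h2, h3⟩ := hc
      subst h1; subst h2
      rw [if_pos ⟨rfl, rfl, h3⟩, if_pos (by omega)]
      apply Finset.sum_congr rfl
      intro t _
      rw [ih, if_neg (by omega)]
    · rw [if_neg hc, ih x y z]
      split_ifs <;> try rfl
      all_goals omega

theorem fP2_char (h w : Nat) (f : Nat → Nat → Nat → Int) (nD : Nat) :
    ∀ x y z, ((List.range nD).foldl (fun f i => (List.range (h+1)).foldl (fun f j => (List.range w).foldl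
        (fun f k => updF f i j (k+1) (f i j (k+1) + f i j k)) f) f) f) x y z
      = if x < nD ∧ y < h+1 ∧ z ≤ w then ∑ t ∈ Finset.range (z+1), f x y t else f x y z := by
  induction nD with
  | zero =>
    intro x y z
    simp only [List.range_zero, List.foldl_nil]
    split_ifs with h
    · omega
    · rfl
  | succ n ih =>
    intro x y z
    rw [show List.range (n+1) = List.range n ++ [n] from List.range_succ]
    rw [List.foldl_append, List.foldl_cons, List.foldl_nil]
    rw [fP2_mid]
    by_cases hc : x = n ∧ y < h+1 ∧ z ≤ w
    · obtain ⟨h1, h2, h3⟩ := hc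
      subst h1
      rw [if_pos ⟨rfl, h2, h3⟩, if_pos (by omega)]
      apply Finset.sum_congr rfl
      intro t _
      rw [ih, if_neg (by omega)]
    · rw [if_neg hc, ih x y z]
      split_ifs <;> try rfl
      all_goals omega

-- pass 3 (scan along the middle axis)
theorem fP3_inner (f : Nat → Nat → Nat → Int) (i j m : Nat) :
    ∀ x y z, ((List.range m).foldl (fun f k => updF f i (j+1) k (f i (j+1) k + f i j k)) f) x y z
      = if x = i ∧ y = j+1 ∧ z < m then f i (j+1) z + f i j z else f x y z := by
  induction m with
  | zero =>
    intro x y z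
    simp only [List.range_zero, List.foldl_nil]
    split_ifs with h
    · omega
    · rfl
  | succ m ih =>
    intro x y z
    rw [show List.range (m+1) = List.range m ++ [m] from List.range_succ]
    rw [List.foldl_append, List.foldl_cons, List.foldl_nil]
    simp only [updF]
    by_cases hc : x = i ∧ y = j+1 ∧ z = m
    · obtain ⟨h1, h2, h3⟩ := hc
      subst h1; subst h2; subst h3
      rw [if_pos ⟨rfl, rfl, rfl⟩, ih, ih, if_neg (by omega), if_neg (by omega),
        if_pos (by omega)]
    · rw [if_neg hc, ih x y z]
      split_ifs <;> try rfl
      all_goals omega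

theorem fP3_mid (w : Nat) (f : Nat → Nat → Nat → Int) (i n : Nat) :
    ∀ x y z, ((List.range n).foldl (fun f j => (List.range (w+1)).foldl
        (fun f k => updF f i (j+1) k (f i (j+1) k + f i j k)) f) f) x y z
      = if x = i ∧ y ≤ n ∧ z < w+1 then ∑ u ∈ Finset.range (y+1), f x u z else f x y z := by
  induction n with
  | zero =>
    intro x y z
    simp only [List.range_zero, List.foldl_nil]
    split_ifs with h
    · obtain ⟨h1, h2, h3⟩ := h
      have hy : y = 0 := by omega
      subst hy
      rw [Finset.sum_range_one]
    · rfl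
  | succ n ih =>
    intro x y z
    rw [show List.range (n+1) = List.range n ++ [n] from List.range_succ]
    rw [List.foldl_append, List.foldl_cons, List.foldl_nil]
    rw [fP3_inner]
    by_cases hc : x = i ∧ y = n+1 ∧ z < w+1
    · obtain ⟨h1, h2, h3⟩ := hc
      subst h1; subst h2
      rw [if_pos ⟨rfl, rfl, h3⟩, ih, ih, if_neg (by omega), if_pos (by omega),
        if_pos (by omega)]
      rw [show (n+1+1 : Nat) = (n+1)+1 from rfl, Finset.sum_range_succ, Finset.sum_range_succ]
      rw [Finset.sum_range_succ]
      ring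
    · rw [if_neg hc, ih x y z]
      split_ifs <;> try rfl
      all_goals omega

theorem fP3_char (h w : Nat) (f : Nat → Nat → Nat → Int) (nD : Nat) :
    ∀ x y z, ((List.range nD).foldl (fun f i => (List.range h).foldl (fun f j => (List.range (w+1)).foldl
        (fun f k => updF f i (j+1) k (f i (j+1) k + f i j k)) f) f) f) x y z
      = if x < nD ∧ y ≤ h ∧ z < w+1 then ∑ u ∈ Finset.range (y+1), f x u z else f x y z := by
  induction nD with
  | zero =>
    intro x y z
    simp only [List.range_zero, List.foldl_nil]
    split_ifs with h
    · omega
    · rfl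
  | succ n ih =>
    intro x y z
    rw [show List.range (n+1) = List.range n ++ [n] from List.range_succ]
    rw [List.foldl_append, List.foldl_cons, List.foldl_nil]
    rw [fP3_mid]
    by_cases hc : x = n ∧ y ≤ h ∧ z < w+1
    · obtain ⟨h1, h2, h3⟩ := hc
      subst h1
      rw [if_pos ⟨rfl, h2, h3⟩, if_pos (by omega)]
      apply Finset.sum_congr rfl
      intro u _
      rw [ih, if_neg (by omega)]
    · rw [if_neg hc, ih x y z]
      split_ifs <;> try rfl
      all_goals omega

-- pass 4 (scan along the first axis)
theorem fP4_inner (f : Nat → Nat → Nat → Int) (i j m : Nat) :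
    ∀ x y z, ((List.range m).foldl (fun f k => updF f (i+1) j k (f (i+1) j k + f i j k)) f) x y z
      = if x = i+1 ∧ y = j ∧ z < m then f (i+1) j z + f i j z else f x y z := by
  induction m with
  | zero =>
    intro x y z
    simp only [List.range_zero, List.foldl_nil]
    split_ifs with h
    · omega
    · rfl
  | succ m ih =>
    intro x y z
    rw [show List.range (m+1) = List.range m ++ [m] from List.range_succ]
    rw [List.foldl_append, List.foldl_cons, List.foldl_nil]
    simp only [updF]
    by_cases hc : x = i+1 ∧ y = j ∧ z = m
    · obtain ⟨h1, h2, h3⟩ := hc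
      subst h1; subst h2; subst h3
      rw [if_pos ⟨rfl, rfl, rfl⟩, ih, ih, if_neg (by omega), if_neg (by omega),
        if_pos (by omega)]
    · rw [if_neg hc, ih x y z]
      split_ifs <;> try rfl
      all_goals omega

theorem fP4_mid (w : Nat) (f : Nat → Nat → Nat → Int) (i n : Nat) :
    ∀ x y z, ((List.range n).foldl (fun f j => (List.range (w+1)).foldl
        (fun f k => updF f (i+1) j k (f (i+1) j k + f i j k)) f) f) x y z
      = if x = i+1 ∧ y < n ∧ z < w+1 then f (i+1) y z + f i y z else f x y z := by
  induction n with
  | zero =>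
    intro x y z
    simp only [List.range_zero, List.foldl_nil]
    split_ifs with h
    · omega
    · rfl
  | succ n ih =>
    intro x y z
    rw [show List.range (n+1) = List.range n ++ [n] from List.range_succ]
    rw [List.foldl_append, List.foldl_cons, List.foldl_nil]
    rw [fP4_inner]
    by_cases hc : x = i+1 ∧ y = n ∧ z < w+1
    · obtain ⟨h1, h2, h3⟩ := hc
      subst h1; subst h2
      rw [if_pos ⟨rfl, rfl, h3⟩, ih, ih, if_neg (by omega), if_neg (by omega),
        if_pos (by omega)]
    · rw [if_neg hc, ih x y z]
      split_ifs <;> try rfl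
      all_goals omega

theorem fP4_char (h w : Nat) (f : Nat → Nat → Nat → Int) (nD : Nat) :
    ∀ x y z, ((List.range nD).foldl (fun f i => (List.range (h+1)).foldl (fun f j => (List.range (w+1)).foldl
        (fun f k => updF f (i+1) j k (f (i+1) j k + f i j k)) f) f) f) x y z
      = if x ≤ nD ∧ y < h+1 ∧ z < w+1 then ∑ u ∈ Finset.range (x+1), f u y z else f x y z := by
  induction nD with
  | zero =>
    intro x y z
    simp only [List.range_zero, List.foldl_nil]
    split_ifs with h
    · obtain ⟨h1, h2, h3⟩ := h
      have hx : x = 0 := by omega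
      subst hx
      rw [Finset.sum_range_one]
    · rfl
  | succ n ih =>
    intro x y z
    rw [show List.range (n+1) = List.range n ++ [n] from List.range_succ]
    rw [List.foldl_append, List.foldl_cons, List.foldl_nil]
    rw [fP4_mid]
    by_cases hc : x = n+1 ∧ y < h+1 ∧ z < w+1
    · obtain ⟨h1, h2, h3⟩ := hc
      subst h1
      rw [if_pos ⟨rfl, h2, h3⟩, ih, ih, if_neg (by omega), if_pos (by omega),
        if_pos (by omega)]
      rw [show (n+1+1 : Nat) = (n+1)+1 from rfl, Finset.sum_range_succ, Finset.sum_range_succ]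
      rw [Finset.sum_range_succ]
      ring
    · rw [if_neg hc, ih x y z]
      split_ifs <;> try rfl
      all_goals omega

-- ==== characterization of B's fused pass ====

theorem S3_x0 (a : List (List (List Int))) (y z : Nat) : S3 a 0 y z = 0 := by simp [S3]
theorem S3_y0 (a : List (List (List Int))) (x z : Nat) : S3 a x 0 z = 0 := by simp [S3]
theorem S3_z0 (a : List (List (List Int))) (x y : Nat) : S3 a x y 0 = 0 := by simp [S3]

theorem fPB_inner (a : List (List (List Int))) (d h w i j : Nat) (hi : i < d) (hj : j < h) :
    ∀ m, m ≤ w → ∀ f : Nat → Nat → Nat → Int,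
    (∀ x y z, x ≤ d → y ≤ h → z ≤ w →
      f x y z = if x = 0 ∨ y = 0 ∨ z = 0 ∨ x ≤ i ∨ (x = i+1 ∧ (y ≤ j ∨ (y = j+1 ∧ z ≤ 0)))
        then S3 a x y z else 0) →
    ∀ x y z, x ≤ d → y ≤ h → z ≤ w →
    ((List.range m).foldl (fun f k => updF f (i+1) (j+1) (k+1)
        (gA a i j k + f i (j+1) (k+1) + f (i+1) j (k+1) + f (i+1) (j+1) k
          - f i j (k+1) - f i (j+1) k - f (i+1) j k + f i j k)) f) x y z
      = if x = 0 ∨ y = 0 ∨ z = 0 ∨ x ≤ i ∨ (x = i+1 ∧ (y ≤ j ∨ (y = j+1 ∧ z ≤ m)))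
        then S3 a x y z else 0 := by
  intro m
  induction m with
  | zero =>
    intro _ f hf x y z hx hy hz
    simpa using hf x y z hx hy hz
  | succ m ih =>
    intro hm f hf x y z hx hy hz
    rw [show List.range (m+1) = List.range m ++ [m] from List.range_succ]
    rw [List.foldl_append, List.foldl_cons, List.foldl_nil]
    simp only [updF]
    have hF := ih (by omega) f hf
    by_cases hc : x = i+1 ∧ y = j+1 ∧ z = m+1
    · obtain ⟨e1, e2, e3⟩ := hc
      subst e1; subst e2; subst e3
      rw [if_pos ⟨rfl, rfl, rfl⟩]
      rw [hF i (j+1) (m+1) (by omega) (by omega) (by omega), if_pos (by omega)]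
      rw [hF (i+1) j (m+1) (by omega) (by omega) (by omega), if_pos (by omega)]
      rw [hF (i+1) (j+1) m (by omega) (by omega) (by omega), if_pos (by omega)]
      rw [hF i j (m+1) (by omega) (by omega) (by omega), if_pos (by omega)]
      rw [hF i (j+1) m (by omega) (by omega) (by omega), if_pos (by omega)]
      rw [hF (i+1) j m (by omega) (by omega) (by omega), if_pos (by omega)]
      rw [hF i j m (by omega) (by omega) (by omega), if_pos (by omega)]
      rw [if_pos (by omega), S3_rec a i j m]
    · rw [if_neg hc, hF x y z hx hy hz]
      split_ifs <;> try rfl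
      all_goals omega

theorem fPB_mid (a : List (List (List Int))) (d h w i : Nat) (hi : i < d) :
    ∀ n, n ≤ h → ∀ f : Nat → Nat → Nat → Int,
    (∀ x y z, x ≤ d → y ≤ h → z ≤ w →
      f x y z = if x = 0 ∨ y = 0 ∨ z = 0 ∨ x ≤ i ∨ (x = i+1 ∧ (y ≤ 0 ∨ (y = 0+1 ∧ z ≤ 0)))
        then S3 a x y z else 0) →
    ∀ x y z, x ≤ d → y ≤ h → z ≤ w →
    ((List.range n).foldl (fun f j => (List.range w).foldl (fun f k => updF f (i+1) (j+1) (k+1)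
        (gA a i j k + f i (j+1) (k+1) + f (i+1) j (k+1) + f (i+1) (j+1) k
          - f i j (k+1) - f i (j+1) k - f (i+1) j k + f i j k)) f) f) x y z
      = if x = 0 ∨ y = 0 ∨ z = 0 ∨ x ≤ i ∨ (x = i+1 ∧ (y ≤ n ∨ (y = n+1 ∧ z ≤ 0)))
        then S3 a x y z else 0 := by
  intro n
  induction n with
  | zero =>
    intro _ f hf x y z hx hy hz
    exact hf x y z hx hy hz
  | succ n ih =>
    intro hn f hf x y z hx hy hz
    rw [show List.range (n+1) = List.range n ++ [n] from List.range_succ]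
    rw [List.foldl_append, List.foldl_cons, List.foldl_nil]
    have hF := ih (by omega) f hf
    have hF' : ∀ x y z, x ≤ d → y ≤ h → z ≤ w →
        ((List.range n).foldl (fun f j => (List.range w).foldl (fun f k => updF f (i+1) (j+1) (k+1)
          (gA a i j k + f i (j+1) (k+1) + f (i+1) j (k+1) + f (i+1) (j+1) k
            - f i j (k+1) - f i (j+1) k - f (i+1) j k + f i j k)) f) f) x y z
        = if x = 0 ∨ y = 0 ∨ z = 0 ∨ x ≤ i ∨ (x = i+1 ∧ (y ≤ n ∨ (y = n+1 ∧ z ≤ 0)))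
          then S3 a x y z else 0 := hF
    rw [fPB_inner a d h w i n hi (by omega) w (le_refl w) _ hF' x y z hx hy hz]
    split_ifs <;> try rfl
    all_goals omega

theorem fPB_outer (a : List (List (List Int))) (d h w : Nat) :
    ∀ n, n ≤ d → ∀ f : Nat → Nat → Nat → Int,
    (∀ x y z, x ≤ d → y ≤ h → z ≤ w →
      f x y z = if x = 0 ∨ y = 0 ∨ z = 0 ∨ x ≤ 0 then S3 a x y z else 0) →
    ∀ x y z, x ≤ d → y ≤ h → z ≤ w →
    ((List.range n).foldl (fun f i => (List.range h).foldl (fun f j => (List.range w).foldl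
        (fun f k => updF f (i+1) (j+1) (k+1)
        (gA a i j k + f i (j+1) (k+1) + f (i+1) j (k+1) + f (i+1) (j+1) k
          - f i j (k+1) - f i (j+1) k - f (i+1) j k + f i j k)) f) f) f) x y z
      = if x = 0 ∨ y = 0 ∨ z = 0 ∨ x ≤ n then S3 a x y z else 0 := by
  intro n
  induction n with
  | zero =>
    intro _ f hf x y z hx hy hz
    exact hf x y z hx hy hz
  | succ n ih =>
    intro hn f hf x y z hx hy hz
    rw [show List.range (n+1) = List.range n ++ [n] from List.range_succ]
    rw [List.foldl_append, List.foldl_cons, List.foldl_nil]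
    have hF := ih (by omega) f hf
    have hF' : ∀ x y z, x ≤ d → y ≤ h → z ≤ w →
        ((List.range n).foldl (fun f i => (List.range h).foldl (fun f j => (List.range w).foldl
          (fun f k => updF f (i+1) (j+1) (k+1)
          (gA a i j k + f i (j+1) (k+1) + f (i+1) j (k+1) + f (i+1) (j+1) k
            - f i j (k+1) - f i (j+1) k - f (i+1) j k + f i j k)) f) f) f) x y z
        = if x = 0 ∨ y = 0 ∨ z = 0 ∨ x ≤ n ∨ (x = n+1 ∧ (y ≤ 0 ∨ (y = 0+1 ∧ z ≤ 0)))
          then S3 a x y z else 0 := by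
      intro x y z hx hy hz
      rw [hF x y z hx hy hz]
      split_ifs <;> try rfl
      all_goals omega
    rw [fPB_mid a d h w n (by omega) h (le_refl h) _ hF' x y z hx hy hz]
    split_ifs <;> try rfl
    all_goals omega

theorem fPB_char (a : List (List (List Int))) (d h w : Nat) :
    ∀ x y z, x ≤ d → y ≤ h → z ≤ w → fPB a d h w x y z = S3 a x y z := by
  intro x y z hx hy hz
  unfold fPB
  have h0 : ∀ x y z, x ≤ d → y ≤ h → z ≤ w →
      (fun (_ _ _ : Nat) => (0:Int)) x y z
        = if x = 0 ∨ y = 0 ∨ z = 0 ∨ x ≤ 0 then S3 a x y z else 0 := by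
    intro x y z _ _ _
    split_ifs with hr
    · have hx0 : x = 0 ∨ y = 0 ∨ z = 0 := by omega
      rcases hx0 with e | e | e <;> subst e
      · rw [S3_x0]
      · rw [S3_y0]
      · rw [S3_z0]
    · rfl
  rw [fPB_outer a d h w d (le_refl d) _ h0 x y z hx hy hz, if_pos (by omega)]

-- ==== composition of A's passes ====

theorem stage2_char (a : List (List (List Int))) (d h w : Nat) :
    ∀ u v t, u ≤ d → v ≤ h → t ≤ w →
    fP2 d h w (fP1 a d h w) u v t
      = if 1 ≤ u ∧ 1 ≤ v then ∑ s ∈ Finset.range t, gA a (u-1) (v-1) s else 0 := by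
  intro u v t hu hv ht
  unfold fP2
  rw [fP2_char h w _ (d+1) u v t, if_pos (by omega)]
  by_cases hc : 1 ≤ u ∧ 1 ≤ v
  · rw [if_pos hc, ← sum_range_shift t (fun s => gA a (u-1) (v-1) s)]
    apply Finset.sum_congr rfl
    intro s hs
    have hs' := Finset.mem_range.mp hs
    unfold fP1
    rw [fP1_char a h w _ d u v s]
    split_ifs <;> try rfl
    all_goals omega
  · rw [if_neg hc]
    apply Finset.sum_eq_zero
    intro s _
    unfold fP1
    rw [fP1_char a h w _ d u v s, if_neg (by omega)]

theorem stage3_char (a : List (List (List Int))) (d h w : Nat) :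
    ∀ u v t, u ≤ d → v ≤ h → t ≤ w →
    fP3 d h w (fP2 d h w (fP1 a d h w)) u v t
      = if 1 ≤ u then ∑ r ∈ Finset.range v, ∑ s ∈ Finset.range t, gA a (u-1) r s else 0 := by
  intro u v t hu hv ht
  unfold fP3
  rw [fP3_char h w _ (d+1) u v t, if_pos (by omega)]
  by_cases hc : 1 ≤ u
  · rw [if_pos hc, ← sum_range_shift v (fun r => ∑ s ∈ Finset.range t, gA a (u-1) r s)]
    apply Finset.sum_congr rfl
    intro r hr
    have hr' := Finset.mem_range.mp hr
    rw [stage2_char a d h w u r t hu (by omega) ht]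
    split_ifs <;> try rfl
    all_goals omega
  · rw [if_neg hc]
    apply Finset.sum_eq_zero
    intro r hr
    have hr' := Finset.mem_range.mp hr
    rw [stage2_char a d h w u r t hu (by omega) ht, if_neg (by omega)]

theorem fA_char (a : List (List (List Int))) (d h w : Nat) :
    ∀ u v t, u ≤ d → v ≤ h → t ≤ w →
    fP4 d h w (fP3 d h w (fP2 d h w (fP1 a d h w))) u v t = S3 a u v t := by
  intro u v t hu hv ht
  unfold fP4
  rw [fP4_char h w _ d u v t, if_pos (by omega)]
  rw [show S3 a u v t
      = ∑ q ∈ Finset.range u, (fun q => ∑ r ∈ Finset.range v, ∑ s ∈ Finset.range t, gA a q r s) q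
      from rfl]
  rw [← sum_range_shift u (fun q => ∑ r ∈ Finset.range v, ∑ s ∈ Finset.range t, gA a q r s)]
  apply Finset.sum_congr rfl
  intro q hq
  have hq' := Finset.mem_range.mp hq
  rw [stage3_char a d h w q v t (by omega) hv ht]

-- ==== final assembly ====

theorem main_eq (a : List (List (List Int))) : accumulate3dim a = accumulate3dim_alt a := by
  rw [portA_F3, portB_F3]
  apply F3_congr
  intro x y z hx hy hz
  rw [fA_char a _ _ _ x y z hx hy hz, fPB_char a _ _ _ x y z hx hy hz]

-- ===== VERDICT (by name: the statement is the Claim_ definition above) =====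
theorem accumulate3dim_spec : Claim_equal_accumulate3dim := by
  intro a _ _
  unfold Spec_accumulate3dim
  exact main_eq a
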